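-- pv_equiv track=rewrite | github.com/Valid8-security/valid8-binaries | scripts/comprehensive_hybrid_test.py | compare_modes
-- ===== SOURCE A (Python) =====
-- from typing import Dict, List, Any
--
-- def compare_modes(fast_results: Dict[str, Any], hybrid_results: Dict[str, Any]) -> Dict[str, Any]:
--     """Compare fast vs hybrid mode results"""
--     fast_vulns = fast_results.get('vulnerabilities', [])
--     hybrid_vulns = hybrid_results.get('vulnerabilities', [])
--
--     # Create comparable signatures
--     def vuln_signature(vuln):
--         return f"{vuln['file_path']}:{vuln['line_number']}:{vuln['cwe']}"
--
--     fast_signatures = {vuln_signature(v) for v in fast_vulns}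
--     hybrid_signatures = {vuln_signature(v) for v in hybrid_vulns}
--
--     # Calculate differences
--     unique_to_fast = fast_signatures - hybrid_signatures
--     unique_to_hybrid = hybrid_signatures - fast_signatures
--     common = fast_signatures & hybrid_signatures
--
--     return {
--         'fast_only': len(unique_to_fast),
--         'hybrid_only': len(unique_to_hybrid),
--         'common': len(common),
--         'total_fast': len(fast_signatures),
--         'total_hybrid': len(hybrid_signatures)
--     }
-- ===== SOURCE B (Python) =====
-- def compare_modes(fast_results, hybrid_results):
--     """Compare fast vs hybrid mode results (single membership-map classification)."""
--     flags = {}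
--     for v in fast_results.get('vulnerabilities', []):
--         sig = f"{v['file_path']}:{v['line_number']}:{v['cwe']}"
--         flags[sig] = (True, flags.get(sig, (False, False))[1])
--     for v in hybrid_results.get('vulnerabilities', []):
--         sig = f"{v['file_path']}:{v['line_number']}:{v['cwe']}"
--         flags[sig] = (flags.get(sig, (False, False))[0], True)
--     vals = list(flags.values())
--     return {
--         'fast_only': sum(1 for f, h in vals if f and not h),
--         'hybrid_only': sum(1 for f, h in vals if h and not f),
--         'common': sum(1 for f, h in vals if f and h),
--         'total_fast': sum(1 for f, h in vals if f),
--         'total_hybrid': sum(1 for f, h in vals if h),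
--     }
-- ===== Notes on version B (the rewrite author's own statement) =====
-- stated objective: alternative
-- what changed: A builds two signature sets and applies three set operators (-, -, &); B makes one pass over each vulnerability list building a single signature->(in_fast, in_hybrid) membership map and derives all five counts by classifying that map's values, with no set operations.
import Mathlib
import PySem

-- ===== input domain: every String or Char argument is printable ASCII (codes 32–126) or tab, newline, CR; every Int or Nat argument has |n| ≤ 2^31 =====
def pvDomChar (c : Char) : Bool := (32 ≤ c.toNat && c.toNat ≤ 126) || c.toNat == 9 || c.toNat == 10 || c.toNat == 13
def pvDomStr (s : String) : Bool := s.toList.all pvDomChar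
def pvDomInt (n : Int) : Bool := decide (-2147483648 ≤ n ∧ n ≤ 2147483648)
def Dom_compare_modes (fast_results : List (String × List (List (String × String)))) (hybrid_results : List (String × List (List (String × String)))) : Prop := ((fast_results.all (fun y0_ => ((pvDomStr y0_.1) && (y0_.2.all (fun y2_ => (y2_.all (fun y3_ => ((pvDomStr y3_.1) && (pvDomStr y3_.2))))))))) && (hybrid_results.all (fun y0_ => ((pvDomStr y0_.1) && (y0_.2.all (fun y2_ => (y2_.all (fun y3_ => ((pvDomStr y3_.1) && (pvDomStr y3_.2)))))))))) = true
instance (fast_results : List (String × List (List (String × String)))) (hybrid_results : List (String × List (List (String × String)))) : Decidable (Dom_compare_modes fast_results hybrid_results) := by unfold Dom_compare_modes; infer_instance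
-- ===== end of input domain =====

-- B replaces A's three set operators (−, −, &) by one signature→(in_fast, in_hybrid) membership map
-- built in a single pass and classified by counting; same counts, objective: alternative (not faster).

-- ===== PORT A =====
-- vuln_signature(v) = f"{v['file_path']}:{v['line_number']}:{v['cwe']}"
-- (exact under Pre_: each vuln dict carries the three keys; Python raises KeyError otherwise)
def vulnSig (v : List (String × String)) : String :=
  (PySem.Dict.getD (PySem.Dict.mk v) "file_path" "") ++ ":" ++
  (PySem.Dict.getD (PySem.Dict.mk v) "line_number" "") ++ ":" ++
  (PySem.Dict.getD (PySem.Dict.mk v) "cwe" "")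

def compare_modes (fast_results : List (String × List (List (String × String)))) (hybrid_results : List (String × List (List (String × String)))) : List (String × Int) :=
  let fast_vulns := PySem.Dict.getD (PySem.Dict.mk fast_results) "vulnerabilities" []
  let hybrid_vulns := PySem.Dict.getD (PySem.Dict.mk hybrid_results) "vulnerabilities" []
  let fast_signatures : PySem.Set String := PySem.Set.ofList (fast_vulns.map vulnSig)
  let hybrid_signatures : PySem.Set String := PySem.Set.ofList (hybrid_vulns.map vulnSig)
  let unique_to_fast := PySem.Set.diff fast_signatures hybrid_signatures
  let unique_to_hybrid := PySem.Set.diff hybrid_signatures fast_signatures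
  let common := PySem.Set.inter fast_signatures hybrid_signatures
  [("fast_only", PySem.Set.len unique_to_fast),
   ("hybrid_only", PySem.Set.len unique_to_hybrid),
   ("common", PySem.Set.len common),
   ("total_fast", PySem.Set.len fast_signatures),
   ("total_hybrid", PySem.Set.len hybrid_signatures)]

-- ===== PORT B =====
def compare_modes_alt (fast_results : List (String × List (List (String × String)))) (hybrid_results : List (String × List (List (String × String)))) : List (String × Int) :=
  let fast_vulns := PySem.Dict.getD (PySem.Dict.mk fast_results) "vulnerabilities" []
  let hybrid_vulns := PySem.Dict.getD (PySem.Dict.mk hybrid_results) "vulnerabilities" []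
  -- flags: sig ↦ (seen in fast, seen in hybrid), built in one pass over each list
  let flags1 : PySem.Dict String (Bool × Bool) :=
    fast_vulns.foldl (fun d v => d.insert (vulnSig v) (true, (d.getD (vulnSig v) (false, false)).2)) PySem.Dict.empty
  let flags : PySem.Dict String (Bool × Bool) :=
    hybrid_vulns.foldl (fun d v => d.insert (vulnSig v) ((d.getD (vulnSig v) (false, false)).1, true)) flags1
  let vals := flags.values
  [("fast_only", (vals.countP (fun p => p.1 && !p.2) : Int)),
   ("hybrid_only", (vals.countP (fun p => p.2 && !p.1) : Int)),
   ("common", (vals.countP (fun p => p.1 && p.2) : Int)),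
   ("total_fast", (vals.countP (fun p => p.1) : Int)),
   ("total_hybrid", (vals.countP (fun p => p.2) : Int))]

-- ===== PRECONDITION & SPEC =====
-- Pre_ excludes exactly the inputs where some processed vuln dict lacks one of the three
-- signature keys: there Python A raises KeyError (B raises the same way).
def Pre_compare_modes (fast_results : List (String × List (List (String × String)))) (hybrid_results : List (String × List (List (String × String)))) : Prop :=
  (∀ v ∈ PySem.Dict.getD (PySem.Dict.mk fast_results) "vulnerabilities" [],
     "file_path" ∈ v.map Prod.fst ∧ "line_number" ∈ v.map Prod.fst ∧ "cwe" ∈ v.map Prod.fst) ∧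
  (∀ v ∈ PySem.Dict.getD (PySem.Dict.mk hybrid_results) "vulnerabilities" [],
     "file_path" ∈ v.map Prod.fst ∧ "line_number" ∈ v.map Prod.fst ∧ "cwe" ∈ v.map Prod.fst)
instance (fast_results : List (String × List (List (String × String)))) (hybrid_results : List (String × List (List (String × String)))) : Decidable (Pre_compare_modes fast_results hybrid_results) := by unfold Pre_compare_modes; infer_instance

def pvWitness_compare_modes : (List (String × List (List (String × String)))) × (List (String × List (List (String × String)))) :=
  ([("vulnerabilities", [[("file_path", "a.py"), ("line_number", "3"), ("cwe", "CWE-79")]])],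
   [("vulnerabilities", [[("file_path", "a.py"), ("line_number", "3"), ("cwe", "CWE-79")],
                         [("file_path", "b.py"), ("line_number", "7"), ("cwe", "CWE-89")]])])

def Spec_compare_modes (fast_results : List (String × List (List (String × String)))) (hybrid_results : List (String × List (List (String × String)))) (out : List (String × Int)) : Prop := out = compare_modes_alt fast_results hybrid_results
instance (fast_results : List (String × List (List (String × String)))) (hybrid_results : List (String × List (List (String × String)))) (out : List (String × Int)) : Decidable (Spec_compare_modes fast_results hybrid_results out) := by unfold Spec_compare_modes; infer_instance

-- ===== CLAIM (what is proved, stated in full; the proofs are below) =====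
def Claim_equal_compare_modes : Prop := ∀ (fast_results : List (String × List (List (String × String)))) (hybrid_results : List (String × List (List (String × String)))), Dom_compare_modes fast_results hybrid_results → Pre_compare_modes fast_results hybrid_results → Spec_compare_modes fast_results hybrid_results (compare_modes fast_results hybrid_results)

-- ===== LEMMAS AND PROOFS =====

-- After the fast pass, the flag pair at s is (s was seen, whatever second flag d had).
lemma fold1_getD (l : List (List (String × String))) (d : PySem.Dict String (Bool × Bool)) (s : String) :
    (l.foldl (fun d v => d.insert (vulnSig v) (true, (d.getD (vulnSig v) (false, false)).2)) d).getD s (false, false)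
    = if s ∈ l.map vulnSig then (true, (d.getD s (false, false)).2) else d.getD s (false, false) := by
  induction l generalizing d with
  | nil => simp
  | cons v l ih =>
    simp only [List.foldl_cons, ih, PySem.Dict.getD_insert, List.map_cons, List.mem_cons]
    by_cases hv : s = vulnSig v <;> by_cases hl : s ∈ l.map vulnSig <;> simp [hv, hl]

-- After the hybrid pass, the second flag at s records membership, the first is preserved.
lemma fold2_getD (l : List (List (String × String))) (d : PySem.Dict String (Bool × Bool)) (s : String) :
    (l.foldl (fun d v => d.insert (vulnSig v) ((d.getD (vulnSig v) (false, false)).1, true)) d).getD s (false, false)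
    = if s ∈ l.map vulnSig then ((d.getD s (false, false)).1, true) else d.getD s (false, false) := by
  induction l generalizing d with
  | nil => simp
  | cons v l ih =>
    simp only [List.foldl_cons, ih, PySem.Dict.getD_insert, List.map_cons, List.mem_cons]
    by_cases hv : s = vulnSig v <;> by_cases hl : s ∈ l.map vulnSig <;> simp [hv, hl]

-- countP p l + countP (¬p) l = length l
lemma countP_add_countP_not {α : Type} (l : List α) (p : α → Bool) :
    l.countP p + l.countP (fun x => !p x) = l.length := by
  induction l with
  | nil => rfl
  | cons a l ih => by_cases h : p a <;> simp [h] <;> omega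

-- Core equality, with the two extracted vulnerability lists abstracted.
lemma compare_core (fv hv : List (List (String × String))) :
    [("fast_only", PySem.Set.len (PySem.Set.diff (PySem.Set.ofList (fv.map vulnSig)) (PySem.Set.ofList (hv.map vulnSig)))),
     ("hybrid_only", PySem.Set.len (PySem.Set.diff (PySem.Set.ofList (hv.map vulnSig)) (PySem.Set.ofList (fv.map vulnSig)))),
     ("common", PySem.Set.len (PySem.Set.inter (PySem.Set.ofList (fv.map vulnSig)) (PySem.Set.ofList (hv.map vulnSig)))),
     ("total_fast", PySem.Set.len (PySem.Set.ofList (fv.map vulnSig))),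
     ("total_hybrid", PySem.Set.len (PySem.Set.ofList (hv.map vulnSig)))]
    = (let flags1 : PySem.Dict String (Bool × Bool) :=
         fv.foldl (fun d v => d.insert (vulnSig v) (true, (d.getD (vulnSig v) (false, false)).2)) PySem.Dict.empty
       let flags : PySem.Dict String (Bool × Bool) :=
         hv.foldl (fun d v => d.insert (vulnSig v) ((d.getD (vulnSig v) (false, false)).1, true)) flags1
       let vals := flags.values
       [("fast_only", (vals.countP (fun p => p.1 && !p.2) : Int)),
        ("hybrid_only", (vals.countP (fun p => p.2 && !p.1) : Int)),
        ("common", (vals.countP (fun p => p.1 && p.2) : Int)),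
        ("total_fast", (vals.countP (fun p => p.1) : Int)),
        ("total_hybrid", (vals.countP (fun p => p.2) : Int))]) := by
  dsimp only
  set F := fv.map vulnSig with hF
  set H := hv.map vulnSig with hH
  set Sf : PySem.Set String := PySem.Set.ofList F with hSf
  set Sh : PySem.Set String := PySem.Set.ofList H with hSh
  set flags1 : PySem.Dict String (Bool × Bool) :=
    fv.foldl (fun d v => d.insert (vulnSig v) (true, (d.getD (vulnSig v) (false, false)).2)) PySem.Dict.empty with hflags1
  set flags : PySem.Dict String (Bool × Bool) :=
    hv.foldl (fun d v => d.insert (vulnSig v) ((d.getD (vulnSig v) (false, false)).1, true)) flags1 with hflags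
  -- the flag pair stored at any signature s
  have hget : ∀ s, flags.getD s (false, false) = (decide (s ∈ F), decide (s ∈ H)) := by
    intro s
    rw [hflags, fold2_getD, hflags1, fold1_getD, ← hF, ← hH]
    simp only [PySem.Dict.getD_empty]
    by_cases h1 : s ∈ F <;> by_cases h2 : s ∈ H <;> simp [h1, h2]
  have hndk : flags.keys.Nodup := by
    rw [hflags, hflags1]
    exact PySem.Dict.nodup_keys_foldl_insert_key _ _ _ _
      (PySem.Dict.nodup_keys_foldl_insert_key _ _ _ _ (by simp [PySem.Dict.keys_empty]))
  have hkeys : flags.keys = Sf ++ List.filter (fun y => !Sf.contains y) Sh := by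
    rw [hflags, PySem.Dict.keys_foldl_insert_key, hflags1, PySem.Dict.keys_foldl_insert_key,
      PySem.Dict.keys_empty, PySem.Set.update_nil_left, ← hF, ← hH, ← hSf,
      PySem.Set.update_eq_append_filter, ← hSh]
  have hvals : flags.values = flags.keys.map (fun s => (decide (s ∈ F), decide (s ∈ H))) := by
    rw [PySem.Dict.values_eq_map_keys flags hndk (false, false)]
    exact List.map_congr_left (fun s _ => hget s)
  -- membership facts
  have hmemF : ∀ s, s ∈ Sf ↔ s ∈ F := fun s => PySem.Set.mem_ofList F s
  have hmemH : ∀ s, s ∈ Sh ↔ s ∈ H := fun s => PySem.Set.mem_ofList H s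
  have hconF : ∀ s, Sf.contains s = decide (s ∈ F) := by
    intro s; by_cases h : s ∈ F <;> simp [h, hmemF]
  -- every count over flags.values splits into the Sf part and the new-hybrid part
  have hcount : ∀ (p : Bool × Bool → Bool), flags.values.countP p
      = Sf.countP (fun s => p (decide (s ∈ F), decide (s ∈ H)))
        + (List.filter (fun y => !Sf.contains y) Sh).countP (fun s => p (decide (s ∈ F), decide (s ∈ H))) := by
    intro p
    rw [hvals, List.countP_map, hkeys, List.countP_append]
    rfl
  have hnewF : ∀ a ∈ List.filter (fun y => !Sf.contains y) Sh, a ∉ F := by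
    intro a ha
    have h2 := (List.mem_filter.mp ha).2
    rw [hconF] at h2
    simpa using h2
  -- the five counts
  have h_fast_only : flags.values.countP (fun p => p.1 && !p.2) = (PySem.Set.diff Sf Sh).length := by
    rw [hcount]
    have hz : (List.filter (fun y => !Sf.contains y) Sh).countP
        (fun s => decide (s ∈ F) && !decide (s ∈ H)) = 0 :=
      List.countP_eq_zero.mpr (fun a ha => by simp [hnewF a ha])
    rw [hz, Nat.add_zero, PySem.Set.diff, ← List.countP_eq_length_filter]
    exact List.countP_congr (by intro x hx; simp [hmemH, (hmemF x).mp hx])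
  have h_hybrid_only : flags.values.countP (fun p => p.2 && !p.1) = (PySem.Set.diff Sh Sf).length := by
    rw [hcount]
    have hz : Sf.countP (fun s => decide (s ∈ H) && !decide (s ∈ F)) = 0 :=
      List.countP_eq_zero.mpr (fun a ha => by simp [(hmemF a).mp ha])
    rw [hz, Nat.zero_add, PySem.Set.diff, ← List.countP_eq_length_filter, List.countP_filter]
    refine List.countP_congr ?_
    intro x hx
    by_cases hd : x ∈ F <;> simp [hmemF, hd, (hmemH x).mp hx]
  have h_common : flags.values.countP (fun p => p.1 && p.2) = (PySem.Set.inter Sf Sh).length := by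
    rw [hcount]
    have hz : (List.filter (fun y => !Sf.contains y) Sh).countP
        (fun s => decide (s ∈ F) && decide (s ∈ H)) = 0 :=
      List.countP_eq_zero.mpr (fun a ha => by simp [hnewF a ha])
    rw [hz, Nat.add_zero, PySem.Set.inter, ← List.countP_eq_length_filter]
    exact List.countP_congr (by intro x hx; simp [hmemH, (hmemF x).mp hx])
  have h_total_fast : flags.values.countP (fun p => p.1) = Sf.length := by
    rw [hcount]
    have hz : (List.filter (fun y => !Sf.contains y) Sh).countP (fun s => decide (s ∈ F)) = 0 :=
      List.countP_eq_zero.mpr (fun a ha => by simp [hnewF a ha])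
    have hfull : Sf.countP (fun s => decide (s ∈ F)) = Sf.length :=
      List.countP_eq_length.mpr (fun a ha => by simp [(hmemF a).mp ha])
    rw [hz, Nat.add_zero, hfull]
  have h_total_hybrid : flags.values.countP (fun p => p.2) = Sh.length := by
    rw [hcount]
    have h1 : Sf.countP (fun s => decide (s ∈ H)) = Sh.countP (fun s => Sf.contains s) := by
      have hp : (PySem.Set.inter Sf Sh).Perm (PySem.Set.inter Sh Sf) := by
        refine (List.perm_ext_iff_of_nodup
          (PySem.Set.nodup_inter _ _ (PySem.Set.nodup_ofList F))
          (PySem.Set.nodup_inter _ _ (PySem.Set.nodup_ofList H))).mpr ?_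
        intro a
        rw [PySem.Set.mem_inter, PySem.Set.mem_inter]
        tauto
      have hl := hp.length_eq
      rw [PySem.Set.inter, PySem.Set.inter, ← List.countP_eq_length_filter,
        ← List.countP_eq_length_filter] at hl
      rw [← hl]
      exact List.countP_congr (by intro x hx; simp [hmemH])
    have h2 : (List.filter (fun y => !Sf.contains y) Sh).countP (fun s => decide (s ∈ H))
        = Sh.countP (fun s => !Sf.contains s) := by
      rw [List.countP_filter]
      exact List.countP_congr (by intro x hx; simp [(hmemH x).mp hx])
    rw [h1, h2]
    exact countP_add_countP_not Sh (fun s => Sf.contains s)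
  simp only [PySem.Set.len, h_fast_only, h_hybrid_only, h_common, h_total_fast, h_total_hybrid]

-- ===== VERDICT (by name: the statement is the Claim_ definition above) =====
theorem compare_modes_spec : Claim_equal_compare_modes := by
  intro fa hy _ _
  show compare_modes fa hy = compare_modes_alt fa hy
  unfold compare_modes compare_modes_alt
  exact compare_core _ _
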